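-- pv_equiv track=rewrite | github.com/ninjin/fader | src/ngram.py | ngram_gen
-- ===== SOURCE A (Python) =====
-- from itertools import chain, tee
--
-- DEFAULT_NULL_CHAR = '~'
--
-- DEFAULT_GUARD_CHAR = '$'
--
-- def nwise(it, n):
--     assert n > 1
--     its = [it]
--     for _ in range(1, n):
--         prev_it = its.pop()
--         new_prev_it, next_it = tee(prev_it)
--         next(next_it, None)
--         its.extend((new_prev_it, next_it, ))
--     return zip(*its)
--
-- def ngram_gen(src_str, size, guard_char=DEFAULT_GUARD_CHAR):
--     if guard_char:
--         left_padding = guard_char * (size - 1)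
--         right_padding = left_padding
--     elif len(src_str) < size:
--         # We need to pad the string with NULL;s to represent "nothing"
--         left_padding = ''
--         right_padding = DEFAULT_NULL_CHAR * (size - len(src_str))
--     else:
--         # No padding is necessary
--         left_padding = ''
--         right_padding = left_padding
--
--     for gram in nwise(chain(left_padding, src_str, right_padding), size):
--         yield ''.join(gram)
-- ===== SOURCE B (Python) =====
-- DEFAULT_NULL_CHAR = '~'
--
-- DEFAULT_GUARD_CHAR = '$'
--
-- def ngram_gen(src_str, size, guard_char=DEFAULT_GUARD_CHAR):
--     if guard_char:
--         left_padding = guard_char * (size - 1)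
--         right_padding = left_padding
--     elif len(src_str) < size:
--         left_padding = ''
--         right_padding = DEFAULT_NULL_CHAR * (size - len(src_str))
--     else:
--         left_padding = ''
--         right_padding = ''
--     padded = left_padding + src_str + right_padding
--     for i in range(len(padded) - size + 1):
--         yield padded[i:i + size]
-- ===== Notes on version B (the rewrite author's own statement) =====
-- stated objective: simpler
-- what changed: Dropped the tee/zip nwise iterator machinery: B materializes the padded string once and yields fixed-size slices by index.
-- outside the precondition, e.g. on ngram_gen('abc', 1, '$'): A raises AssertionError, B returns ['a', 'b', 'c']
import Mathlib
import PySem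

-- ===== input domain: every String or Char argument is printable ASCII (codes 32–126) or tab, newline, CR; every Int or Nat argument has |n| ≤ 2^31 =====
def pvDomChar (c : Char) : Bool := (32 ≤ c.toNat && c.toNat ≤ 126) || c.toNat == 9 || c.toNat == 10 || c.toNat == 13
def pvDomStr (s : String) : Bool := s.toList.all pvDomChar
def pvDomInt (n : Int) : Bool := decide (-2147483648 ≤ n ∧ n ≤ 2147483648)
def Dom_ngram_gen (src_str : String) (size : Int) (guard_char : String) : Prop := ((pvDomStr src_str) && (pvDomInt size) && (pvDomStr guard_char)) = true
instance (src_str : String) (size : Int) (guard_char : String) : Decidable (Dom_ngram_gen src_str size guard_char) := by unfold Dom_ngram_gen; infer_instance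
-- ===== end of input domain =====

-- B replaces A's tee/zip `nwise` iterator machinery with one concrete padded string
-- sliced by index (simpler); return-value equivalence is proved for size ≥ 2 (A's nwise
-- asserts n > 1, so A raises AssertionError whenever size ≤ 1 — excluded by Pre_).


-- ===== PORT A =====

-- Python's `s * k` on a string (empty for k ≤ 0) — exact; used by both Pythons' padding lines.
def pyStrMul (s : List Char) (k : Int) : List Char := (List.replicate k.toNat s).flatten

-- the `for _ in range(1, n)` loop of nwise: pop the last iterator, tee it, advance the copy.
-- an iterator over chars is modelled as the list of its remaining elements; tee = duplicate,
-- next(it, None) = tail. fuel = the loop's iteration count (n - 1).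
def pvItsLoop : Nat → List (List Char) → List (List Char)
  | 0, its => its
  | k + 1, its => pvItsLoop k (its.dropLast ++ [its.getLastD [], (its.getLastD []).tail])

-- zip(*its): emit the tuple of heads while every iterator is nonempty (zip stops at the shortest).
def pvZipStar : List (List Char) → List (List Char)
  | [] => []
  | l :: rest =>
    if l.isEmpty || rest.any List.isEmpty then []
    else ((l :: rest).map (fun it => it.headD default)) :: pvZipStar ((l :: rest).map List.tail)
termination_by its => (its.headD []).length
decreasing_by
  simp only [List.map_cons, List.headD_cons]
  cases l with
  | nil => simp_all
  | cons a t => simp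

def nwise (it : List Char) (n : Int) : List (List Char) :=
  -- `assert n > 1`: A raises AssertionError for n ≤ 1 (those inputs are excluded by Pre_)
  pvZipStar (pvItsLoop (n.toNat - 1) [it])

def ngram_gen (src_str : String) (size : Int) (guard_char : String) : List String :=
  let pads : List Char × List Char :=
    if guard_char.toList ≠ [] then
      let left_padding := pyStrMul guard_char.toList (size - 1)
      (left_padding, left_padding)
    else if (src_str.toList.length : Int) < size then
      ([], pyStrMul ['~'] (size - src_str.toList.length))
    else ([], [])
  let chained := pads.1 ++ src_str.toList ++ pads.2   -- chain(left_padding, src_str, right_padding)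
  (nwise chained size).map (fun gram => String.ofList gram)   -- ''.join(gram)

-- ===== PORT B =====

def ngram_gen_alt (src_str : String) (size : Int) (guard_char : String) : List String :=
  let pads : List Char × List Char :=
    if guard_char.toList ≠ [] then
      let left_padding := pyStrMul guard_char.toList (size - 1)
      (left_padding, left_padding)
    else if (src_str.toList.length : Int) < size then
      ([], pyStrMul ['~'] (size - src_str.toList.length))
    else ([], [])
  let padded := pads.1 ++ src_str.toList ++ pads.2
  (PySem.List.pyRange 0 ((padded.length : Int) - size + 1) 1).map
    (fun i => String.ofList (PySem.List.slice padded (some i) (some (i + size))))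

-- ===== PRECONDITION & SPEC =====
-- A's nwise `assert n > 1` raises AssertionError on every input with size ≤ 1.
def Pre_ngram_gen (src_str : String) (size : Int) (guard_char : String) : Prop := 2 ≤ size
instance (src_str : String) (size : Int) (guard_char : String) : Decidable (Pre_ngram_gen src_str size guard_char) := by unfold Pre_ngram_gen; infer_instance
def pvWitness_ngram_gen : String × Int × String := ("abc", 2, "$")

def Spec_ngram_gen (src_str : String) (size : Int) (guard_char : String) (out : List String) : Prop := out = ngram_gen_alt src_str size guard_char
instance (src_str : String) (size : Int) (guard_char : String) (out : List String) : Decidable (Spec_ngram_gen src_str size guard_char out) := by unfold Spec_ngram_gen; infer_instance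

-- ===== CLAIM (what is proved, stated in full; the proofs are below) =====
def Claim_equal_ngram_gen : Prop := ∀ (src_str : String) (size : Int) (guard_char : String), Dom_ngram_gen src_str size guard_char → Pre_ngram_gen src_str size guard_char → Spec_ngram_gen src_str size guard_char (ngram_gen src_str size guard_char)

-- ===== LEMMAS AND PROOFS =====

-- the common sliding-window characterisation both sides are reduced to
def pvW (n : Nat) : List Char → List (List Char)
  | [] => []
  | c :: l => if (c :: l).length < n then [] else (c :: l).take n :: pvW n l

-- A's nwise loop leaves exactly the staggered iterators drop 0, drop 1, …, drop m
theorem pvItsLoop_eq (m : Nat) (pre : List (List Char)) (p : List Char) :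
    pvItsLoop m (pre ++ [p]) = pre ++ (List.range (m + 1)).map (p.drop ·) := by
  induction m generalizing pre p with
  | zero => simp [pvItsLoop, List.range_succ]
  | succ m ih =>
    rw [pvItsLoop]
    have h1 : (pre ++ [p]).dropLast = pre := by simp
    have h2 : (pre ++ [p]).getLastD [] = p := by simp
    rw [h1, h2]
    have : pre ++ [p, p.tail] = (pre ++ [p]) ++ [p.tail] := by simp
    rw [this, ih]
    have h3 : ∀ k : Nat, p.tail.drop k = p.drop (k + 1) := by
      intro k; rw [← List.drop_one, List.drop_drop, Nat.add_comm]
    simp only [List.range_succ_eq_map (n := m + 1), List.map_cons, List.map_map]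
    simp [Function.comp_def, h3]

theorem heads_eq (n : Nat) (l : List Char) (h : n ≤ l.length) :
    (List.range n).map (fun k => (l.drop k).headD default) = l.take n := by
  apply List.ext_getElem
  · simp [Nat.min_eq_left h]
  · intro i h1 h2
    simp only [List.getElem_map, List.getElem_range, List.getElem_take]
    simp only [List.headD_eq_head?_getD, List.head?_drop]
    simp only [List.length_map, List.length_range] at h1
    rw [List.getElem?_eq_getElem (by omega)]
    rfl

theorem any_isEmpty_iff (m : Nat) (t : List Char) :
    ((List.range m).map (fun k => t.drop k)).any List.isEmpty = decide (t.length < m) := by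
  rcases Nat.lt_or_ge t.length m with h | h
  · rw [decide_eq_true h, List.any_eq_true]
    exact ⟨t.drop t.length, List.mem_map.2 ⟨t.length, List.mem_range.2 h, rfl⟩, by simp⟩
  · rw [decide_eq_false (by omega), List.any_eq_false]
    intro x hx
    obtain ⟨k, hk, rfl⟩ := List.mem_map.1 hx
    simp only [List.mem_range] at hk
    simp only [List.isEmpty_iff, List.drop_eq_nil_iff]
    omega

-- zipping the staggered iterators is the sliding-window function
theorem pvZipStar_eq (n : Nat) (hn : 1 ≤ n) (l : List Char) :
    pvZipStar ((List.range n).map (l.drop ·)) = pvW n l := by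
  obtain ⟨m, rfl⟩ : ∃ m, n = m + 1 := ⟨n - 1, by omega⟩
  clear hn
  induction l with
  | nil =>
    rw [List.range_succ_eq_map, List.map_cons, pvZipStar]
    simp [pvW]
  | cons c t ih =>
    rw [List.range_succ_eq_map, List.map_cons, pvZipStar]
    have hrest : (List.map (fun x => List.drop x (c :: t)) (List.map Nat.succ (List.range m)))
        = (List.range m).map (fun k => t.drop k) := by
      simp [List.map_map, Function.comp_def]
    rw [hrest, List.drop_zero, any_isEmpty_iff]
    simp only [List.isEmpty_cons, Bool.false_or]
    rw [pvW]
    by_cases h : t.length < m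
    · rw [decide_eq_true h]
      simp only [if_true]
      rw [if_pos (show (c :: t).length < m + 1 by simp only [List.length_cons]; omega)]
    · rw [decide_eq_false h]
      simp only [Bool.false_eq_true, if_false]
      rw [if_neg (show ¬ (c :: t).length < m + 1 by simp only [List.length_cons]; omega)]
      congr 1
      · rw [List.map_cons, List.headD_cons, List.map_map]
        rw [show ((fun it => List.headD it default) ∘ fun k => List.drop k t)
              = (fun k => (t.drop k).headD default) from rfl]
        rw [heads_eq m t (by omega)]
        simp
      · rw [List.map_cons, List.map_map]
        have : (List.tail ∘ fun k => List.drop k t) = fun k => t.drop (Nat.succ k) := by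
          funext k
          simp only [Function.comp_apply, ← List.drop_one, List.drop_drop]
        rw [this, ← ih, List.range_succ_eq_map, List.map_cons, List.map_map]
        rfl

-- the sliding windows, indexed: exactly B's loop bound and slices
theorem pvW_eq_ranges (n : Nat) (hn : 1 ≤ n) (l : List Char) :
    pvW n l = (List.range (l.length + 1 - n)).map (fun i => (l.drop i).take n) := by
  induction l with
  | nil =>
    rw [pvW]
    simp [Nat.sub_eq_zero_of_le hn]
  | cons c t ih =>
    rw [pvW]
    by_cases h : (c :: t).length < n
    · rw [if_pos h]
      simp only [List.length_cons] at h ⊢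
      rw [show t.length + 1 + 1 - n = 0 by omega]
      simp
    · rw [if_neg h]
      simp only [List.length_cons] at h ⊢
      rw [show t.length + 1 + 1 - n = (t.length + 1 - n) + 1 by omega, List.range_succ_eq_map]
      rw [List.map_cons, List.map_map, List.drop_zero, ih]
      congr 1

theorem ngram_gen_spec' (src_str : String) (size : Int) (guard_char : String)
    (h : 2 ≤ size) : ngram_gen src_str size guard_char = ngram_gen_alt src_str size guard_char := by
  obtain ⟨n, rfl⟩ : ∃ n : Nat, size = (n : Int) := ⟨size.toNat, by omega⟩
  simp only [ngram_gen, ngram_gen_alt, nwise]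
  set padded := (if guard_char.toList ≠ [] then
      let left_padding := pyStrMul guard_char.toList ((n : Int) - 1)
      (left_padding, left_padding)
    else if (src_str.toList.length : Int) < (n : Int) then
      ([], pyStrMul ['~'] ((n : Int) - src_str.toList.length))
    else ([], [])).1 ++ src_str.toList ++ (if guard_char.toList ≠ [] then
      let left_padding := pyStrMul guard_char.toList ((n : Int) - 1)
      (left_padding, left_padding)
    else if (src_str.toList.length : Int) < (n : Int) then
      ([], pyStrMul ['~'] ((n : Int) - src_str.toList.length))
    else ([], [])).2 with hp
  have hn2 : 2 ≤ n := by exact_mod_cast h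
  have hA : pvItsLoop ((n : Int).toNat - 1) [padded]
      = (List.range n).map (padded.drop ·) := by
    have := pvItsLoop_eq (n - 1) [] padded
    simpa [show n - 1 + 1 = n by omega] using this
  rw [hA, pvZipStar_eq n (by omega) padded, pvW_eq_ranges n (by omega) padded]
  set L := padded.length with hL
  by_cases hcase : L + 1 ≤ n
  · -- too short: both sides empty
    rw [show L + 1 - n = 0 by omega]
    have : PySem.List.pyRange 0 ((L : Int) - n + 1) 1 = [] := by
      simp [PySem.List.pyRange]
      omega
    rw [this]
    simp
  · have hm : (L : Int) - n + 1 = ((L + 1 - n : Nat) : Int) := by omega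
    rw [hm, PySem.List.pyRange_zero_natCast, List.map_map, List.map_map]
    apply List.map_congr_left
    intro k _
    simp only [Function.comp_apply]
    have : (k : Int) + n = ((k + n : Nat) : Int) := by push_cast; ring
    rw [this, PySem.List.slice_natCast]
    rw [show k + n - k = n by omega]

-- ===== VERDICT (by name: the statement is the Claim_ definition above) =====
theorem ngram_gen_spec : Claim_equal_ngram_gen := by
  intro s n g _ hpre
  exact ngram_gen_spec' s n g hpre
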